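-- pv_equiv track=rewrite | github.com/sstuqtd/xcode_obf | ipa_string_extractor.py | deduplicate_and_filter
-- ===== SOURCE A (Python) =====
-- def deduplicate_and_filter(strings: list[str], min_len: int = 2, max_len: int = 500) -> list[str]:
--     """去重并过滤无效字符串"""
--     seen = set()
--     result = []
--     for s in strings:
--         s = s.strip()
--         if min_len <= len(s) <= max_len and s not in seen and not s.isdigit():
--             seen.add(s)
--             result.append(s)
--     return result
-- ===== SOURCE B (Python) =====
-- def deduplicate_and_filter(strings: list[str], min_len: int = 2, max_len: int = 500) -> list[str]:
--     # Back-to-front construction: walk the list from the right; whenever the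
--     # stripped string is valid, put it at the front and delete its later
--     # duplicates from the partial result. No seen-set is maintained.
--     result = []
--     for s in reversed(strings):
--         t = s.strip()
--         if min_len <= len(t) <= max_len and not t.isdigit():
--             result = [t] + [x for x in result if x != t]
--     return result
-- ===== Notes on version B (the rewrite author's own statement) =====
-- stated objective: alternative
-- what changed: Replaces the forward loop with a seen-set by a right-to-left accumulation that builds the result back-to-front: each valid stripped string is prepended and its later duplicates are deleted from the partial result by a scan, so no auxiliary seen container exists.
import Mathlib
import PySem

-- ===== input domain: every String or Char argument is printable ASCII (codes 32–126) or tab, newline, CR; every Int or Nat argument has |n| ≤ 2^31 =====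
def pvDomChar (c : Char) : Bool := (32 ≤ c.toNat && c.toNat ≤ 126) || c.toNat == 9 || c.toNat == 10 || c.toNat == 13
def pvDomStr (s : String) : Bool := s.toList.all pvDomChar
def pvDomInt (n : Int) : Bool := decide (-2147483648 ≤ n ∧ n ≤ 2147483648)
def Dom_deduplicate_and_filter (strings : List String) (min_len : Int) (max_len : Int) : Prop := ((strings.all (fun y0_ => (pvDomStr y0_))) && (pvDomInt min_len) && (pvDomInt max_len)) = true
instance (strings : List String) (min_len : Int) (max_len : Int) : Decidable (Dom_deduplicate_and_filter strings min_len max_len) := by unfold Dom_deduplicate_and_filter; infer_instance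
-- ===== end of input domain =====

-- B replaces A's forward loop with a seen-set by a right-to-left accumulation that builds the
-- result back-to-front, deleting later duplicates from the partial result; same values.

-- ===== PORT A =====
-- one interleaved loop over strings carrying (seen, result)
def deduplicate_and_filter (strings : List String) (min_len : Int) (max_len : Int) : List String :=
  (strings.foldl (fun (st : PySem.Set String × List String) s0 =>
    let s := PySem.Str.strip s0
    if decide (min_len ≤ PySem.Str.len s) && decide (PySem.Str.len s ≤ max_len)
        && !(PySem.Set.contains st.1 s) && !(PySem.Str.strIsdigit s)
    then (PySem.Set.add st.1 s, st.2 ++ [s])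
    else st) (PySem.Set.empty, [])).2

-- ===== PORT B =====
-- right-to-left loop with accumulator (Python's 'for s in reversed(strings)') = foldr
def deduplicate_and_filter_alt (strings : List String) (min_len : Int) (max_len : Int) : List String :=
  strings.foldr (fun s result =>
    let t := PySem.Str.strip s
    if decide (min_len ≤ PySem.Str.len t) && decide (PySem.Str.len t ≤ max_len)
        && !(PySem.Str.strIsdigit t)
    then t :: result.filter (fun x => !(x == t))
    else result) []

-- ===== PRECONDITION & SPEC =====
def Spec_deduplicate_and_filter (strings : List String) (min_len : Int) (max_len : Int) (out : List String) : Prop := out = deduplicate_and_filter_alt strings min_len max_len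
instance (strings : List String) (min_len : Int) (max_len : Int) (out : List String) : Decidable (Spec_deduplicate_and_filter strings min_len max_len out) := by unfold Spec_deduplicate_and_filter; infer_instance

-- ===== CLAIM =====
def Claim_equal_deduplicate_and_filter : Prop := ∀ (strings : List String) (min_len : Int) (max_len : Int), Dom_deduplicate_and_filter strings min_len max_len → Spec_deduplicate_and_filter strings min_len max_len (deduplicate_and_filter strings min_len max_len)

-- ===== LEMMAS AND PROOFS =====

-- first-occurrence dedup, written as B's recursion (dedup of the tail, head's duplicates removed)
def dedupF : List String → List String
  | [] => []
  | x :: xs => x :: (dedupF xs).filter (fun y => !(y == x))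

-- A's seen-set fold from acc equals acc ++ (dedupF, with acc's members removed)
theorem foldl_add_eq_dedupF (xs : List String) (acc : List String) :
    xs.foldl PySem.Set.add acc = acc ++ (dedupF xs).filter (fun y => !(PySem.Set.contains acc y)) := by
  induction xs generalizing acc with
  | nil => simp [dedupF]
  | cons x xs ih =>
    simp only [List.foldl_cons, dedupF, List.filter_cons, List.filter_filter]
    by_cases hm : x ∈ acc
    · have hc : PySem.Set.contains acc x = true := by
        simpa [PySem.Set.contains] using hm
      rw [PySem.Set.add_of_mem hm, ih acc, hc]
      simp only [Bool.not_true, Bool.false_eq_true, if_false]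
      congr 1
      apply List.filter_congr
      intro y _
      by_cases hy : y ∈ acc
      · simp [PySem.Set.contains, hy]
      · have hne : y ≠ x := fun h => hy (h ▸ hm)
        simp [PySem.Set.contains, hy, hne]
    · have hc : PySem.Set.contains acc x = false := by
        simpa [PySem.Set.contains] using hm
      rw [PySem.Set.add_of_not_mem hm, ih (acc ++ [x]), hc]
      simp only [Bool.not_false, if_true, List.append_assoc, List.singleton_append]
      congr 2
      apply List.filter_congr
      intro y _
      have : PySem.Set.contains (acc ++ [x]) y = (PySem.Set.contains acc y || y == x) := by
        simp only [PySem.Set.contains, List.contains_eq_mem, List.mem_append,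
          List.mem_singleton, Bool.decide_or]
        cases h1 : (y == x) <;> cases h3 : decide (y = x) <;> simp_all
      rw [this]
      simp only [PySem.Set.contains, List.contains_eq_mem]
      cases h1 : (y == x) <;> cases h2 : decide (y ∈ acc) <;> cases h3 : decide (y = x) <;>
        simp_all

-- A's loop invariant: the result component is dedupF of the filtered stripped input
theorem dedup_filter_loop_inv (min_len max_len : Int) (xs : List String) (acc : List String) :
    xs.foldl (fun (st : PySem.Set String × List String) s0 =>
      let s := PySem.Str.strip s0
      if decide (min_len ≤ PySem.Str.len s) && decide (PySem.Str.len s ≤ max_len)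
          && !(PySem.Set.contains st.1 s) && !(PySem.Str.strIsdigit s)
      then (PySem.Set.add st.1 s, st.2 ++ [s])
      else st) (acc, acc)
    = ((((xs.map PySem.Str.strip).filter (fun s =>
          decide (min_len ≤ PySem.Str.len s) && decide (PySem.Str.len s ≤ max_len)
            && !(PySem.Str.strIsdigit s)))).foldl PySem.Set.add acc,
       (((xs.map PySem.Str.strip).filter (fun s =>
          decide (min_len ≤ PySem.Str.len s) && decide (PySem.Str.len s ≤ max_len)
            && !(PySem.Str.strIsdigit s)))).foldl PySem.Set.add acc) := by
  induction xs generalizing acc with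
  | nil => simp
  | cons x xs ih =>
    simp only [List.foldl_cons, List.map_cons, List.filter_cons]
    by_cases hF : (decide (min_len ≤ PySem.Str.len (PySem.Str.strip x))
        && decide (PySem.Str.len (PySem.Str.strip x) ≤ max_len)
        && !(PySem.Str.strIsdigit (PySem.Str.strip x))) = true
    · by_cases hm : PySem.Set.contains acc (PySem.Str.strip x) = true
      · have hA : (decide (min_len ≤ PySem.Str.len (PySem.Str.strip x))
            && decide (PySem.Str.len (PySem.Str.strip x) ≤ max_len)
            && !(PySem.Set.contains acc (PySem.Str.strip x))
            && !(PySem.Str.strIsdigit (PySem.Str.strip x))) = false := by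
          rw [hm]; simp
        have hadd : PySem.Set.add acc (PySem.Str.strip x) = acc := by
          simp [PySem.Set.add]; simpa using hm
        simp only [hF, if_true, hA, List.foldl_cons, hadd]
        exact ih acc
      · have hA : (decide (min_len ≤ PySem.Str.len (PySem.Str.strip x))
            && decide (PySem.Str.len (PySem.Str.strip x) ≤ max_len)
            && !(PySem.Set.contains acc (PySem.Str.strip x))
            && !(PySem.Str.strIsdigit (PySem.Str.strip x))) = true := by
          revert hF
          cases decide (min_len ≤ PySem.Str.len (PySem.Str.strip x)) <;>
            cases decide (PySem.Str.len (PySem.Str.strip x) ≤ max_len) <;>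
              cases PySem.Str.strIsdigit (PySem.Str.strip x) <;> simp_all
        have hadd : PySem.Set.add acc (PySem.Str.strip x) = acc ++ [PySem.Str.strip x] := by
          simp [PySem.Set.add]; simpa using hm
        simp only [hF, if_true, hA, List.foldl_cons, hadd]
        exact ih (acc ++ [PySem.Str.strip x])
    · have hA : (decide (min_len ≤ PySem.Str.len (PySem.Str.strip x))
          && decide (PySem.Str.len (PySem.Str.strip x) ≤ max_len)
          && !(PySem.Set.contains acc (PySem.Str.strip x))
          && !(PySem.Str.strIsdigit (PySem.Str.strip x))) = false := by
        revert hF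
        cases decide (min_len ≤ PySem.Str.len (PySem.Str.strip x)) <;>
          cases decide (PySem.Str.len (PySem.Str.strip x) ≤ max_len) <;>
            cases PySem.Str.strIsdigit (PySem.Str.strip x) <;>
              cases PySem.Set.contains acc (PySem.Str.strip x) <;> simp
      rw [Bool.not_eq_true] at hF
      simp only [hF, hA]
      exact ih acc

-- B's right-to-left accumulation computes dedupF of the filtered stripped input
theorem alt_eq_dedupF (min_len max_len : Int) (xs : List String) :
    deduplicate_and_filter_alt xs min_len max_len
    = dedupF ((xs.map PySem.Str.strip).filter (fun s =>
        decide (min_len ≤ PySem.Str.len s) && decide (PySem.Str.len s ≤ max_len)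
          && !(PySem.Str.strIsdigit s))) := by
  induction xs with
  | nil => rfl
  | cons x xs ih =>
    unfold deduplicate_and_filter_alt at ih ⊢
    simp only [List.foldr_cons, List.map_cons, List.filter_cons]
    by_cases hF : (decide (min_len ≤ PySem.Str.len (PySem.Str.strip x))
        && decide (PySem.Str.len (PySem.Str.strip x) ≤ max_len)
        && !(PySem.Str.strIsdigit (PySem.Str.strip x))) = true
    · simp only [hF, if_true, dedupF, ih]
    · rw [Bool.not_eq_true] at hF
      simp only [hF, Bool.false_eq_true, if_false, ih]

-- ===== VERDICT =====
theorem deduplicate_and_filter_spec : Claim_equal_deduplicate_and_filter := by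
  intro strings min_len max_len _
  unfold Spec_deduplicate_and_filter deduplicate_and_filter
  rw [show (PySem.Set.empty : PySem.Set String) = ([] : List String) from rfl]
  rw [dedup_filter_loop_inv min_len max_len strings []]
  rw [foldl_add_eq_dedupF]
  rw [alt_eq_dedupF]
  simp [PySem.Set.contains]
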